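-- pv_equiv track=rewrite | github.com/karan1149/Hella | simulation/dataset.py | granular_asset
-- ===== SOURCE A (Python) =====
-- import collections
--
-- def granular_asset(asset):
-- 	"""
-- 	add seconds granularity to asset
-- 	return granular asset
-- 	"""
-- 	granular_asset = []
-- 	time_buckets = collections.defaultdict(list)
--
-- 	for time, lat, lon in asset:
-- 		time_buckets[time].append((time, lat, lon))
--
-- 	for time_key in sorted(time_buckets.keys()):
-- 		per_minute = len(time_buckets[time_key])
-- 		seconds_per = 60 // per_minute
--
-- 		for dp_i, data_point in enumerate(time_buckets[time_key]):
-- 			time, lat, lon = data_point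
-- 			granular_asset.append((time + dp_i * seconds_per, lat, lon))
--
-- 	return granular_asset
-- ===== SOURCE B (Python) =====
-- def granular_asset(asset):
-- 	"""
-- 	add seconds granularity to asset
-- 	return granular asset
-- 	"""
-- 	s = sorted(asset, key=lambda p: p[0])
-- 	out = []
-- 	i = 0
-- 	while i < len(s):
-- 		j = i + 1
-- 		while j < len(s) and s[j][0] == s[i][0]:
-- 			j += 1
-- 		run = s[i:j]
-- 		seconds_per = 60 // len(run)
-- 		for off, (time, lat, lon) in enumerate(run):
-- 			out.append((time + off * seconds_per, lat, lon))
-- 		i = j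
-- 	return out
-- ===== Notes on version B (the rewrite author's own statement) =====
-- stated objective: alternative
-- what changed: Replaces A's defaultdict-bucketing followed by a pass over sorted keys with a single stable sort of the whole list by time and one scan over adjacent equal-time runs.
import Mathlib
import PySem

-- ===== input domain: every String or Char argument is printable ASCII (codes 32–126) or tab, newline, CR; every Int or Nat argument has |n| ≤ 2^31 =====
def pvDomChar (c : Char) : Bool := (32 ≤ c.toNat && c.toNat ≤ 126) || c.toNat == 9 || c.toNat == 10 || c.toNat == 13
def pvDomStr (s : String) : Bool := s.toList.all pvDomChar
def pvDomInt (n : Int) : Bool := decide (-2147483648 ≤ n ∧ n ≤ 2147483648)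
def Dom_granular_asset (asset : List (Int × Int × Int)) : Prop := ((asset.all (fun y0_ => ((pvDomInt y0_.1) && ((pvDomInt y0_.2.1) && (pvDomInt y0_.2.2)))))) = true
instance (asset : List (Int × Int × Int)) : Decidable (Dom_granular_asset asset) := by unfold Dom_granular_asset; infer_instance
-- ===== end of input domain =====

-- B replaces A's defaultdict-bucket-then-sorted-keys pass by a stable sort of the whole
-- list followed by one scan over adjacent equal-time runs (objective: alternative).

-- ===== PORT A =====
def granular_asset (asset : List (Int × Int × Int)) : List (Int × Int × Int) :=
  let time_buckets :=
    asset.foldl (fun d x => d.modify x.1 [] (fun l => l ++ [x])) PySem.Dict.empty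
  (PySem.List.sorted time_buckets.keys (fun k => k)).foldl
    (fun acc time_key =>
      let bucket := time_buckets.getD time_key []
      let per_minute : Int := (bucket.length : Int)
      let seconds_per := PySem.Int.floordiv 60 per_minute
      (PySem.List.enumerate bucket).foldl
        (fun acc2 p => acc2 ++ [(p.2.1 + p.1 * seconds_per, p.2.2.1, p.2.2.2)]) acc)
    []

-- ===== PORT B =====
-- one scan over the stably sorted list: peel off the leading run of equal times, emit it
def gaEmitRuns : List (Int × Int × Int) → List (Int × Int × Int)
  | [] => []
  | x :: xs =>
    let run := x :: xs.takeWhile (fun y => y.1 == x.1)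
    let seconds_per := PySem.Int.floordiv 60 (run.length : Int)
    ((PySem.List.enumerate run).map (fun p => (p.2.1 + p.1 * seconds_per, p.2.2.1, p.2.2.2)))
      ++ gaEmitRuns (xs.dropWhile (fun y => y.1 == x.1))
termination_by l => l.length
decreasing_by
  simpa using Nat.lt_succ_of_le (List.length_dropWhile_le _ _)

def granular_asset_alt (asset : List (Int × Int × Int)) : List (Int × Int × Int) :=
  gaEmitRuns (PySem.List.sorted asset (fun p => p.1))

-- ===== PRECONDITION & SPEC =====
def Spec_granular_asset (asset : List (Int × Int × Int)) (out : List (Int × Int × Int)) : Prop := out = granular_asset_alt asset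
instance (asset : List (Int × Int × Int)) (out : List (Int × Int × Int)) : Decidable (Spec_granular_asset asset out) := by unfold Spec_granular_asset; infer_instance

-- ===== CLAIM (what is proved, stated in full; the proofs are below) =====
def Claim_equal_granular_asset : Prop := ∀ (asset : List (Int × Int × Int)), Dom_granular_asset asset → Spec_granular_asset asset (granular_asset asset)

-- ===== LEMMAS AND PROOFS =====
-- proof-side abbreviations
def gaFilt (L : List (Int × Int × Int)) (k : Int) : List (Int × Int × Int) :=
  L.filter (fun y => y.1 == k)

def gaEmit (g : List (Int × Int × Int)) : List (Int × Int × Int) :=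
  (PySem.List.enumerate g).map
    (fun p => (p.2.1 + p.1 * PySem.Int.floordiv 60 (g.length : Int), p.2.2.1, p.2.2.2))

def gaKs (L : List (Int × Int × Int)) : List Int :=
  PySem.List.sorted (PySem.Set.ofList (L.map (fun y => y.1))) (fun k => k)

-- insertBy (the step of PySem's stable sort) keeps the accumulator key-sorted
lemma ga_ib_pairwise (x : Int × Int × Int) (ys : List (Int × Int × Int))
    (h : ys.Pairwise (fun a b => a.1 ≤ b.1)) :
    (PySem.List.insertBy (fun a b => decide (a.1 < b.1)) x ys).Pairwise (fun a b => a.1 ≤ b.1) := by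
  induction ys with
  | nil => simp [PySem.List.insertBy]
  | cons y ys ih =>
    rw [PySem.List.insertBy]
    rcases List.pairwise_cons.mp h with ⟨hy, hys⟩
    by_cases hlt : x.1 < y.1
    · simp only [hlt, decide_true, if_true]
      refine List.pairwise_cons.mpr ⟨?_, h⟩
      intro z hz
      rcases List.mem_cons.mp hz with rfl | hz
      · exact le_of_lt hlt
      · exact le_trans (le_of_lt hlt) (hy z hz)
    · simp only [hlt, decide_false]
      refine List.pairwise_cons.mpr ⟨?_, ih hys⟩
      intro z hz
      rcases (PySem.List.mem_insertBy _ _ _ _).mp hz with rfl | hz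
      · exact le_of_not_gt hlt
      · exact hy z hz

-- filtering one key out of an insertBy step: the new element lands after its equals
lemma ga_ib_filter (k : Int) (x : Int × Int × Int) (ys : List (Int × Int × Int))
    (h : ys.Pairwise (fun a b => a.1 ≤ b.1)) :
    gaFilt (PySem.List.insertBy (fun a b => decide (a.1 < b.1)) x ys) k
      = gaFilt ys k ++ (if x.1 == k then [x] else []) := by
  induction ys with
  | nil =>
    simp [PySem.List.insertBy, gaFilt, List.filter]
    split <;> simp_all
  | cons y ys ih =>
    rw [PySem.List.insertBy]
    rcases List.pairwise_cons.mp h with ⟨hy, hys⟩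
    by_cases hlt : x.1 < y.1
    · simp only [hlt, decide_true, if_true]
      by_cases hxk : x.1 == k
      · -- k = x.1 < everything in y :: ys, so the old filter is empty
        have hk : k = x.1 := (beq_iff_eq.mp hxk).symm
        have hnil : gaFilt (y :: ys) k = [] := by
          simp only [gaFilt, List.filter_eq_nil_iff]
          intro z hz
          rcases List.mem_cons.mp hz with rfl | hz
          · simp [hk]; omega
          · have := hy z hz; simp [hk]; omega
        simp only [gaFilt] at hnil ⊢
        simp [hxk, hnil]
      · simp [gaFilt, List.filter_cons, hxk]
    · simp only [hlt, decide_false]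
      simp only [gaFilt, List.filter_cons] at *
      by_cases hyk : y.1 == k
      · simp [hyk, ih hys]
      · simp [hyk, ih hys]

-- the whole insertion-sort fold, with the sortedness invariant carried along
lemma ga_foldl_ins (k : Int) (l : List (Int × Int × Int)) : ∀ (acc : List (Int × Int × Int)),
    acc.Pairwise (fun a b => a.1 ≤ b.1) →
    (l.foldl (fun acc x => PySem.List.insertBy (fun a b => decide (a.1 < b.1)) x acc) acc).Pairwise (fun a b => a.1 ≤ b.1) ∧
    gaFilt (l.foldl (fun acc x => PySem.List.insertBy (fun a b => decide (a.1 < b.1)) x acc) acc) k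
      = gaFilt acc k ++ gaFilt l k := by
  induction l with
  | nil => intro acc h; simpa [gaFilt] using h
  | cons x l ih =>
    intro acc h
    rcases ih (PySem.List.insertBy (fun a b => decide (a.1 < b.1)) x acc) (ga_ib_pairwise x acc h) with ⟨hp, hf⟩
    refine ⟨hp, ?_⟩
    simp only [List.foldl_cons] at *
    rw [hf, ga_ib_filter k x acc h]
    simp only [gaFilt, List.filter_cons]
    by_cases hxk : x.1 == k <;> simp [hxk]

-- stability of PySem's sort: the equal-key subsequence is preserved
lemma ga_sorted_filter (asset : List (Int × Int × Int)) (k : Int) :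
    gaFilt (PySem.List.sorted asset (fun p => p.1)) k = gaFilt asset k := by
  rw [PySem.List.sorted_eq_foldl_insertBy]
  simpa [gaFilt] using (ga_foldl_ins k asset [] (by simp)).2

-- A's time bucket for key k is the k-filtered input, in input order
lemma ga_bucket (asset : List (Int × Int × Int)) (k : Int) :
    (asset.foldl (fun d x => d.modify x.1 [] (fun l => l ++ [x])) PySem.Dict.empty).getD k []
      = gaFilt asset k := by
  have h := PySem.Dict.getD_foldl_modify_append (asset.map (fun x => (x.1, x)))
      (PySem.Dict.empty : PySem.Dict Int (List (Int × Int × Int))) k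
  rw [List.foldl_map] at h
  simpa [gaFilt, List.filter_map, Function.comp_def] using h

lemma ga_keys (asset : List (Int × Int × Int)) :
    (asset.foldl (fun d x => d.modify x.1 [] (fun l => l ++ [x])) PySem.Dict.empty).keys
      = PySem.Set.ofList (asset.map (fun y => y.1)) := by
  rw [PySem.Dict.keys_foldl_modify_key]
  simp [PySem.Set.update, PySem.Set.ofList_eq_foldl, PySem.Dict.keys_empty]

-- A in normal form: emit each key's filtered bucket, keys in sorted order
lemma ga_A_norm (asset : List (Int × Int × Int)) :
    granular_asset asset = (gaKs asset).flatMap (fun k => gaEmit (gaFilt asset k)) := by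
  simp only [granular_asset]
  have hinner : ∀ (acc : List (Int × Int × Int)) (k : Int),
      (PySem.List.enumerate ((asset.foldl (fun d x => d.modify x.1 [] (fun l => l ++ [x])) PySem.Dict.empty).getD k [])).foldl
        (fun acc2 p => acc2 ++ [(p.2.1 + p.1 * PySem.Int.floordiv 60
          ((((asset.foldl (fun d x => d.modify x.1 [] (fun l => l ++ [x])) PySem.Dict.empty).getD k []).length : Int)), p.2.2.1, p.2.2.2)]) acc
      = acc ++ gaEmit (gaFilt asset k) := by
    intro acc k
    rw [PySem.List.foldl_append_singleton_eq_map, ga_bucket, gaEmit]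
  rw [ga_keys]
  refine (PySem.List.foldl_congr_mem _ _ (fun acc k => acc ++ gaEmit (gaFilt asset k)) _
        (fun acc k _ => hinner acc k)).trans ?_
  rw [PySem.List.foldl_append_eq_flatMap]
  simp [gaKs]

lemma ga_ks_sorted (asset : List (Int × Int × Int)) :
    gaKs (PySem.List.sorted asset (fun p => p.1)) = gaKs asset := by
  refine PySem.List.sorted_eq_sorted_of_perm _ _ _ (fun a b h => h) ?_
  refine (List.perm_ext_iff_of_nodup (PySem.Set.nodup_ofList _) (PySem.Set.nodup_ofList _)).mpr ?_
  intro a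
  simp only [PySem.Set.mem_ofList, List.mem_map]
  constructor
  · rintro ⟨y, hy, rfl⟩
    exact ⟨y, (PySem.List.mem_sorted _ _ _ _).mp hy, rfl⟩
  · rintro ⟨y, hy, rfl⟩
    exact ⟨y, (PySem.List.mem_sorted _ _ _ _).mpr hy, rfl⟩

-- on a key-sorted list the leading equal-key run is the whole key's filter
lemma ga_tw_filter (x1 : Int) (xs : List (Int × Int × Int))
    (hge : ∀ z ∈ xs, x1 ≤ z.1) (hp : xs.Pairwise (fun a b => a.1 ≤ b.1)) :
    xs.takeWhile (fun y => y.1 == x1) = xs.filter (fun y => y.1 == x1) := by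
  induction xs with
  | nil => rfl
  | cons y ys ih =>
    rcases List.pairwise_cons.mp hp with ⟨hy, hys⟩
    by_cases hk : y.1 == x1
    · simp only [List.takeWhile_cons, List.filter_cons, hk, if_true]
      rw [ih (fun z hz => hge z (List.mem_cons_of_mem _ hz)) hys]
    · simp only [List.takeWhile_cons, List.filter_cons, hk, if_false, Bool.false_eq_true]
      symm
      rw [List.filter_eq_nil_iff]
      intro z hz
      have h1 : x1 ≤ y.1 := hge y (List.mem_cons_self)
      have h2 : y.1 ≤ z.1 := hy z hz
      have h3 : y.1 ≠ x1 := by simpa using hk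
      simp only [beq_iff_eq]
      omega

lemma ga_dw_gt (x1 : Int) (xs : List (Int × Int × Int))
    (hge : ∀ z ∈ xs, x1 ≤ z.1) (hp : xs.Pairwise (fun a b => a.1 ≤ b.1)) :
    ∀ z ∈ xs.dropWhile (fun y => y.1 == x1), x1 < z.1 := by
  induction xs with
  | nil => simp
  | cons y ys ih =>
    rcases List.pairwise_cons.mp hp with ⟨hy, hys⟩
    by_cases hk : y.1 == x1
    · simp only [List.dropWhile_cons, hk, if_true]
      exact ih (fun z hz => hge z (List.mem_cons_of_mem _ hz)) hys
    · simp only [List.dropWhile_cons, if_neg hk]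
      intro z hz
      have h1 : x1 ≤ y.1 := hge y (List.mem_cons_self)
      have h3 : y.1 ≠ x1 := by simpa using hk
      rcases List.mem_cons.mp hz with rfl | hz
      · omega
      · have := hy z hz; omega

lemma ga_mem_ks (M : List (Int × Int × Int)) (k : Int) :
    k ∈ gaKs M ↔ ∃ z ∈ M, z.1 = k := by
  rw [gaKs, PySem.List.mem_sorted, PySem.Set.mem_ofList]
  simp

-- B in normal form on a key-sorted list
lemma ga_runs_norm (L : List (Int × Int × Int)) :
    L.Pairwise (fun a b => a.1 ≤ b.1) →
    gaEmitRuns L = (gaKs L).flatMap (fun k => gaEmit (gaFilt L k)) := by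
  induction L using gaEmitRuns.induct with
  | case1 => intro _; simp [gaEmitRuns, gaKs, gaFilt, PySem.Set.ofList]
  | case2 x xs ih =>
    intro h
    rcases List.pairwise_cons.mp h with ⟨hge, hxs⟩
    have f2 := ga_dw_gt x.1 xs hge hxs
    have f3 : (xs.dropWhile (fun y => y.1 == x.1)).Pairwise (fun a b => a.1 ≤ b.1) :=
      hxs.sublist (List.dropWhile_sublist _)
    have f1 : x :: xs.takeWhile (fun y => y.1 == x.1) = gaFilt (x :: xs) x.1 := by
      rw [gaFilt, List.filter_cons_of_pos (by simp), ga_tw_filter x.1 xs hge hxs]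
    have hdk : ∀ k, k ∈ gaKs (xs.dropWhile (fun y => y.1 == x.1)) → x.1 < k := by
      intro k hk
      rcases (ga_mem_ks _ _).mp hk with ⟨z, hz, rfl⟩
      exact f2 z hz
    have hxs' := List.takeWhile_append_dropWhile (p := fun y => y.1 == x.1) (l := xs)
    have f4 : gaKs (x :: xs) = x.1 :: gaKs (xs.dropWhile (fun y => y.1 == x.1)) := by
      refine PySem.List.sorted_eq_of_perm_of_pairwise_lt _ _ _ ?_ ?_
      · refine (List.perm_ext_iff_of_nodup ?_ (PySem.Set.nodup_ofList _)).mpr ?_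
        · refine List.nodup_cons.mpr ⟨fun hmem => absurd (hdk _ hmem) (by omega), ?_⟩
          exact (PySem.List.sorted_perm _ _ _).nodup_iff.mpr (PySem.Set.nodup_ofList _)
        · intro a
          rw [PySem.Set.mem_ofList, List.mem_cons, ga_mem_ks]
          simp only [List.mem_map]
          constructor
          · rintro (rfl | ⟨z, hz, rfl⟩)
            · exact ⟨x, List.mem_cons_self, rfl⟩
            · exact ⟨z, List.mem_cons_of_mem _ ((List.dropWhile_sublist _).subset hz), rfl⟩
          · rintro ⟨z, hz, rfl⟩
            rcases List.mem_cons.mp hz with rfl | hz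
            · exact Or.inl rfl
            · by_cases hk : z.1 == x.1
              · exact Or.inl (by simpa using hk)
              · refine Or.inr ⟨z, ?_, rfl⟩
                rw [← hxs'] at hz
                rcases List.mem_append.mp hz with hz | hz
                · exact absurd (List.mem_takeWhile_imp hz) (by simpa using hk)
                · exact hz
      · exact List.pairwise_cons.mpr ⟨hdk, PySem.List.sorted_ofList_pairwise_lt _⟩
    have f5 : ∀ k ∈ gaKs (xs.dropWhile (fun y => y.1 == x.1)),
        gaFilt (x :: xs) k = gaFilt (xs.dropWhile (fun y => y.1 == x.1)) k := by
      intro k hk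
      have hkgt : x.1 < k := hdk k hk
      rw [gaFilt, List.filter_cons_of_neg (by simp; omega)]
      conv_lhs => rw [← hxs']
      rw [List.filter_append]
      have ht : (xs.takeWhile (fun y => y.1 == x.1)).filter (fun y => y.1 == k) = [] := by
        rw [List.filter_eq_nil_iff]
        intro z hz
        have := List.mem_takeWhile_imp hz
        simp only [beq_iff_eq] at this ⊢
        omega
      rw [ht, List.nil_append, gaFilt]
    rw [gaEmitRuns, f4, List.flatMap_cons, ← f1, ih f3]
    exact congrArg₂ (· ++ ·) rfl ((List.flatMap_congr (fun k hk => by rw [f5 k hk])).symm)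

-- ===== VERDICT (by name: the statement is the Claim_ definition above) =====
theorem granular_asset_spec : Claim_equal_granular_asset := by
  intro asset _
  show granular_asset asset = granular_asset_alt asset
  rw [ga_A_norm, granular_asset_alt,
    ga_runs_norm _ (PySem.List.sorted_pairwise asset (fun p => p.1)),
    ga_ks_sorted]
  exact List.flatMap_congr (fun k _ => by rw [ga_sorted_filter])
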